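-- pv_equiv track=rewrite | github.com/anirvinv/VisualSort | test2.py | lightUpIndices
-- ===== SOURCE A (Python) =====
-- def lightUpIndices(arraySizes):
--     sizes = arraySizes.copy()
--     indices = []
--     # indices.append([i for i in range(sizes[0])])
--     count = 0
--     for size in sizes:
--         indices.append([i + count for i in range(size)])
--         count += size
--     return indices
-- ===== SOURCE B (Python) =====
-- def lightUpIndices(arraySizes):
--     sizes = arraySizes.copy()
--     end = sum(sizes)
--     out = []
--     for size in reversed(sizes):
--         end -= size
--         out.append(list(range(end, end + size)))
--     out.reverse()
--     return out
-- ===== Notes on version B (the rewrite author's own statement) =====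
-- stated objective: alternative
-- what changed: B precomputes the total, traverses the sizes in reverse while subtracting a running end offset and building each block as list(range(end, end+size)), then reverses the output, instead of A's forward pass shifting a comprehension over range(size) by an accumulating count.
import Mathlib
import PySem

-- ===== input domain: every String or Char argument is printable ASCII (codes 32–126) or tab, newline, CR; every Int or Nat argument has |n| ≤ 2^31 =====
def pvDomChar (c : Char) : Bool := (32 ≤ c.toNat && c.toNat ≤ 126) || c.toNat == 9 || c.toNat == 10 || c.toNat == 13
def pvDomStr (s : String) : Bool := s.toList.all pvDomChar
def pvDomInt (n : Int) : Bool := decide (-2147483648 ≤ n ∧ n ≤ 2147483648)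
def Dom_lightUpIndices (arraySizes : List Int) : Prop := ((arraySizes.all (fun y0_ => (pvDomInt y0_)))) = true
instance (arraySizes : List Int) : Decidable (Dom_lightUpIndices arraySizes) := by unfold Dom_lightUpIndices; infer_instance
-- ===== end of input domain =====

-- B builds the blocks back-to-front from the precomputed total instead of A's forward accumulating count (alternative decomposition; return value only — A copies its argument and mutates nothing observable).

-- ===== PORT A =====
def lightUpIndices (arraySizes : List Int) : List (List Int) :=
  let sizes := arraySizes            -- sizes = arraySizes.copy()
  let st := sizes.foldl (fun (st : List (List Int) × Int) size =>
      (st.1 ++ [(PySem.List.pyRange 0 size 1).map (fun i => i + st.2)], st.2 + size))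
    ([], 0)
  st.1

-- ===== PORT B =====
def lightUpIndices_alt (arraySizes : List Int) : List (List Int) :=
  let sizes := arraySizes            -- sizes = arraySizes.copy()
  let total := sizes.foldl (· + ·) 0 -- end = sum(sizes)
  let st := sizes.reverse.foldl (fun (st : Int × List (List Int)) size =>
      (st.1 - size, st.2 ++ [PySem.List.pyRange (st.1 - size) (st.1 - size + size) 1]))
    (total, [])
  st.2.reverse

-- ===== PRECONDITION & SPEC =====
def Spec_lightUpIndices (arraySizes : List Int) (out : List (List Int)) : Prop := out = lightUpIndices_alt arraySizes
instance (arraySizes : List Int) (out : List (List Int)) : Decidable (Spec_lightUpIndices arraySizes out) := by unfold Spec_lightUpIndices; infer_instance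

-- ===== CLAIM (what is proved, stated in full; the proofs are below) =====
def Claim_equal_lightUpIndices : Prop := ∀ (arraySizes : List Int), Dom_lightUpIndices arraySizes → Spec_lightUpIndices arraySizes (lightUpIndices arraySizes)

-- ===== LEMMAS AND PROOFS =====

/-- The common specification: blocks of consecutive indices, first block starting at `c`. -/
def pvBlocks (c : Int) : List Int → List (List Int)
  | [] => []
  | s :: rest => PySem.List.pyRange c (c + s) 1 :: pvBlocks (c + s) rest

/-- B's loop builds blocks ending at `e`, walking the (reversed) sizes. -/
def pvRevBlocks (e : Int) : List Int → List (List Int)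
  | [] => []
  | s :: rest => PySem.List.pyRange (e - s) (e - s + s) 1 :: pvRevBlocks (e - s) rest

theorem pvFoldlAdd (l : List Int) (c : Int) : l.foldl (· + ·) c = c + l.sum := by
  induction l generalizing c with
  | nil => simp
  | cons a t ih => simp [List.foldl_cons, ih]; ring

theorem pvShift (c s : Int) :
    (PySem.List.pyRange 0 s 1).map (fun i => i + c) = PySem.List.pyRange c (c + s) 1 := by
  simp [PySem.List.pyRange_one, List.map_map]
  intro a _
  ring

theorem pvA_loop (l : List Int) (acc : List (List Int)) (c : Int) :
    l.foldl (fun (st : List (List Int) × Int) size =>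
      (st.1 ++ [(PySem.List.pyRange 0 size 1).map (fun i => i + st.2)], st.2 + size)) (acc, c)
    = (acc ++ pvBlocks c l, c + l.sum) := by
  induction l generalizing acc c with
  | nil => simp [pvBlocks]
  | cons s rest ih =>
      simp only [List.foldl_cons]
      rw [ih]
      simp [pvBlocks, pvShift]
      ring

theorem pvB_loop (m : List Int) (e : Int) (acc : List (List Int)) :
    m.foldl (fun (st : Int × List (List Int)) size =>
      (st.1 - size, st.2 ++ [PySem.List.pyRange (st.1 - size) (st.1 - size + size) 1])) (e, acc)
    = (e - m.sum, acc ++ pvRevBlocks e m) := by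
  induction m generalizing e acc with
  | nil => simp [pvRevBlocks]
  | cons s rest ih =>
      simp only [List.foldl_cons]
      rw [ih]
      simp [pvRevBlocks]
      ring

theorem pvBlocks_append_single (l : List Int) (c x : Int) :
    pvBlocks c (l ++ [x])
      = pvBlocks c l ++ [PySem.List.pyRange (c + l.sum) (c + l.sum + x) 1] := by
  induction l generalizing c with
  | nil => simp [pvBlocks]
  | cons a t ih =>
      simp only [List.cons_append, pvBlocks, ih, List.sum_cons]
      rw [show c + a + t.sum = c + (a + t.sum) by ring]

theorem pvRev_eq (l : List Int) (e : Int) :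
    (pvRevBlocks e l).reverse = pvBlocks (e - l.sum) l.reverse := by
  induction l generalizing e with
  | nil => simp [pvRevBlocks, pvBlocks]
  | cons s rest ih =>
      simp only [pvRevBlocks, List.reverse_cons, ih, List.sum_cons,
        pvBlocks_append_single, List.sum_reverse]
      rw [show e - s - rest.sum = e - (s + rest.sum) by ring,
          show e - (s + rest.sum) + rest.sum = e - s by ring,
          show e - s + s = e - s + s by rfl]

-- ===== VERDICT (by name: the statement is the Claim_ definition above) =====
theorem lightUpIndices_spec : Claim_equal_lightUpIndices := by
  intro arraySizes _
  show _ = _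
  simp only [lightUpIndices, lightUpIndices_alt, pvA_loop, pvB_loop, pvFoldlAdd,
    List.nil_append]
  rw [pvRev_eq, List.sum_reverse,
    show (0:Int) + arraySizes.sum - arraySizes.sum = 0 by ring, List.reverse_reverse]
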